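-- pv_equiv track=rewrite | github.com/siwanghu/USTC | AG/Lab2/section_bag.py | solve
-- ===== SOURCE A (Python) =====
-- def solve(value,weight,total):
--     sums,values=0,0
--     while(sums<total):
--         index=value.index(max(value))
--         if(weight[index]<=total-sums):
--             sums=sums+weight[index]
--             values=values+weight[index]*value[index]
--             del value[index]
--             del weight[index]
--         else:
--             values=values+(total-sums)*value[index]
--             sums=total
--     return values
-- ===== SOURCE B (Python) =====
-- def solve(value, weight, total):
--     items = sorted(zip(value, weight), key=lambda p: -p[0])
--     values = 0
--     remaining = total
--     for v, w in items:
--         if remaining <= 0: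
--             break
--         if w <= remaining:
--             values += w * v
--             remaining -= w
--         else:
--             values += remaining * v
--             break
--     return values
-- ===== Notes on version B (the rewrite author's own statement) =====
-- stated objective: faster
-- what changed: A repeatedly scans the remaining list with max()/index() and deletes the chosen item (quadratic); B sorts the (value, weight) pairs once by value descending (stable, so ties keep A's first-max order) and does a single greedy pass.
-- outside the precondition, e.g. on solve([2, 1], [20, -30], 5): A returns 10, B returns 10; on solve([2], [3, 4], 3): A returns 6, B returns 6
import Mathlib
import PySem

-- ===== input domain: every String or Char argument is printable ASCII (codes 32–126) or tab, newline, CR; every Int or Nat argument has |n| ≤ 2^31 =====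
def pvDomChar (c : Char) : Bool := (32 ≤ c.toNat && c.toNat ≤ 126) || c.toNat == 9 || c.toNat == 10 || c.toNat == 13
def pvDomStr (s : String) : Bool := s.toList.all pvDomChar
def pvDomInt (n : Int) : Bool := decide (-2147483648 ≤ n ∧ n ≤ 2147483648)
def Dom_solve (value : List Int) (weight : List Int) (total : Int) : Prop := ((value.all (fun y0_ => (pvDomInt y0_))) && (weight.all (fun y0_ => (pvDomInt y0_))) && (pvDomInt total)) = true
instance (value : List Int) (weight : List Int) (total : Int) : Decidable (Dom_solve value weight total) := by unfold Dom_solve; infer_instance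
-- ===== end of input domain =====

-- B replaces A's repeated max()/index()/del scans by one stable sort by value
-- descending and a single greedy pass (objective: faster). A mutates its list
-- arguments in place (del); B does not — the equivalence proved is about the
-- return value only.

-- ===== PORT A =====
-- A's while loop: each iteration picks the first maximal value, takes the item
-- (deleting it from both lists) or a fraction of it. Fuel `value.length + 1`
-- bounds the iterations: every recursing iteration deletes one element.
-- The `0` results stand for Python exceptions (max of empty list / IndexError);
-- Pre_solve excludes those inputs.
def solveLoopA (fuel : Nat) (value weight : List Int) (total sums values : Int) : Int :=
  match fuel with
  | 0 => 0
  | fuel + 1 =>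
    if sums < total then
      match PySem.List.max? value (fun y => y) with
      | none => 0                                    -- max([]) raises ValueError
      | some m =>
        match PySem.List.index? value m with
        | none => 0                                  -- unreachable (m ∈ value)
        | some idx =>
          match PySem.List.pyGet? weight (idx : Int), PySem.List.pyGet? value (idx : Int) with
          | some w, some v =>
            if w ≤ total - sums then
              solveLoopA fuel (value.eraseIdx idx) (weight.eraseIdx idx) total (sums + w) (values + w * v)
            else values + (total - sums) * v
          | _, _ => 0                                -- weight[index] raises IndexError
    else values

def solve (value : List Int) (weight : List Int) (total : Int) : Int :=
  solveLoopA (value.length + 1) value weight total 0 0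

-- ===== PORT B =====
-- B's for loop over the sorted items, with its two `break`s.
def solveLoopB : List (Int × Int) → Int → Int → Int
  | [], _, values => values
  | (v, w) :: rest, remaining, values =>
    if remaining ≤ 0 then values
    else if w ≤ remaining then solveLoopB rest (remaining - w) (values + w * v)
    else values + remaining * v

def solve_alt (value : List Int) (weight : List Int) (total : Int) : Int :=
  solveLoopB (PySem.List.sorted (value.zip weight) (fun p => -p.1) false) total 0

-- ===== PRECONDITION & SPEC =====
-- Pre_ excludes the inputs where A's greedy loop exhausts the lists and raises
-- (ValueError on max([]) or IndexError on weight[index]): a requested total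
-- exceeding the sum of the weights, or mismatched list lengths with a positive
-- total. A few such inputs (a single oversized or negative weight, an unused
-- longer weight list) still return in A and are conservatively excluded; B
-- returns the same value there (see the cited examples).
def Pre_solve (value : List Int) (weight : List Int) (total : Int) : Prop :=
  total ≤ 0 ∨ (value.length = weight.length ∧ total ≤ weight.sum)
instance (value : List Int) (weight : List Int) (total : Int) : Decidable (Pre_solve value weight total) := by unfold Pre_solve; infer_instance

def pvWitness_solve : List Int × List Int × Int := ([60, 100, 120], [10, 20, 30], 50)

def Spec_solve (value : List Int) (weight : List Int) (total : Int) (out : Int) : Prop := out = solve_alt value weight total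
instance (value : List Int) (weight : List Int) (total : Int) (out : Int) : Decidable (Spec_solve value weight total out) := by unfold Spec_solve; infer_instance

-- ===== CLAIM (what is proved, stated in full; the proofs are below) =====
def Claim_equal_solve : Prop := ∀ (value : List Int) (weight : List Int) (total : Int), Dom_solve value weight total → Pre_solve value weight total → Spec_solve value weight total (solve value weight total)

-- ===== LEMMAS AND PROOFS =====

-- B's loop returns immediately when no capacity remains.
theorem solveLoopB_nonpos (l : List (Int × Int)) (r values : Int) (h : r ≤ 0) :
    solveLoopB l r values = values := by
  cases l with
  | nil => rfl
  | cons p rest =>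
    obtain ⟨v, w⟩ := p
    simp [solveLoopB, h]

-- insertBy puts x in front when it goes before every element of s.
theorem insertBy_eq_cons {α : Type} (before : α → α → Bool) (x : α) (s : List α)
    (h : ∀ y ∈ s, before x y = true) : PySem.List.insertBy before x s = x :: s := by
  cases s with
  | nil => rfl
  | cons y ys =>
    simp [PySem.List.insertBy, h y (by simp)]

-- inserting an element that does not go before p keeps p at the head.
theorem insertBy_cons_of_not_before {α : Type} (before : α → α → Bool) (x p : α) (s : List α)
    (h : before x p = false) :
    PySem.List.insertBy before x (p :: s) = p :: PySem.List.insertBy before x s := by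
  simp [PySem.List.insertBy, h]

-- folding insertions of elements that never go before p keeps p at the head.
theorem foldl_insertBy_cons {α : Type} (before : α → α → Bool) (p : α) (l : List α)
    (h : ∀ x ∈ l, before x p = false) (s : List α) :
    l.foldl (fun acc x => PySem.List.insertBy before x acc) (p :: s)
      = p :: l.foldl (fun acc x => PySem.List.insertBy before x acc) s := by
  induction l generalizing s with
  | nil => rfl
  | cons x xs ih =>
    simp only [List.foldl_cons]
    rw [insertBy_cons_of_not_before before x p s (h x (by simp))]
    exact ih (fun y hy => h y (by simp [hy])) _

-- STABILITY / SELECTION: if p's key is strictly below every key on its left and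
-- at most every key on its right, the stable sort puts p first.
theorem sorted_select {α κ : Type} [LinearOrder κ] (key : α → κ) (l₁ l₂ : List α) (p : α)
    (h₁ : ∀ x ∈ l₁, key p < key x) (h₂ : ∀ x ∈ l₂, key p ≤ key x) :
    PySem.List.sorted (l₁ ++ p :: l₂) key false
      = p :: PySem.List.sorted (l₁ ++ l₂) key false := by
  rw [PySem.List.sorted_eq_foldl_insertBy, PySem.List.sorted_eq_foldl_insertBy,
    List.foldl_append, List.foldl_append, List.foldl_cons]
  rw [insertBy_eq_cons _ p _ (by
    intro y hy
    have hmem : y ∈ l₁ := by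
      have := PySem.List.sorted_perm l₁ key false
      rw [← PySem.List.sorted_eq_foldl_insertBy] at hy
      exact this.mem_iff.mp hy
    simpa using h₁ y hmem)]
  exact foldl_insertBy_cons _ p l₂ (fun x hx => by simpa using not_lt.mpr (h₂ x hx)) _

-- sum of a list after deleting one in-range element.
theorem sum_eraseIdx : ∀ (xs : List Int) (n : Nat) (h : n < xs.length),
    (xs.eraseIdx n).sum = xs.sum - xs[n]
  | x :: xs, 0, _ => by simp
  | x :: xs, n + 1, h => by
    have := sum_eraseIdx xs n (by simpa using h)
    simp [List.eraseIdx_cons_succ, this]; ring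

-- zip commutes with eraseIdx.
theorem zip_eraseIdx : ∀ (xs ys : List Int) (n : Nat),
    (xs.eraseIdx n).zip (ys.eraseIdx n) = (xs.zip ys).eraseIdx n
  | [], _, _ => by simp
  | _ :: _, [], _ => by simp
  | x :: xs, y :: ys, 0 => by simp
  | x :: xs, y :: ys, n + 1 => by
    simp [List.eraseIdx_cons_succ, zip_eraseIdx xs ys n]

-- MAIN INVARIANT: with equal lengths, enough fuel and capacity not exceeding
-- the remaining weight, A's select-max-and-delete loop equals B's scan of the
-- stably sorted remaining items.
theorem loopA_eq_loopB (fuel : Nat) :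
    ∀ (value weight : List Int) (total sums values : Int),
      value.length = weight.length → value.length < fuel →
      total - sums ≤ weight.sum →
      solveLoopA fuel value weight total sums values
        = solveLoopB (PySem.List.sorted (value.zip weight) (fun p => -p.1) false)
            (total - sums) values := by
  induction fuel with
  | zero => intro value weight total sums values _ hfuel _; omega
  | succ fuel ih =>
    intro value weight total sums values hlen hfuel hcap
    by_cases hrun : sums < total
    · -- capacity remains; the remaining weight is positive, so value ≠ []
      have hsum_pos : 0 < weight.sum := by omega
      have hwne : weight ≠ [] := by rintro rfl; simp at hsum_pos
      have hvne : value ≠ [] := by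
        rintro rfl; exact hwne (List.length_eq_zero_iff.mp hlen.symm)
      obtain ⟨m, hm⟩ : ∃ m, PySem.List.max? value (fun y => y) = some m := by
        cases h : PySem.List.max? value (fun y => y) with
        | none => exact absurd ((PySem.List.max?_eq_none_iff _ _).mp h) hvne
        | some m => exact ⟨m, rfl⟩
      have hmmem : m ∈ value := PySem.List.max?_mem hm
      have hmax : ∀ y ∈ value, y ≤ m := by
        intro y hy; simpa using PySem.List.max?_isMax hm y hy
      obtain ⟨idx, hidx⟩ : ∃ k, PySem.List.index? value m = some k := by
        cases h : PySem.List.index? value m with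
        | none => exact absurd hmmem ((PySem.List.index?_eq_none_iff _ _).mp h)
        | some k => exact ⟨k, rfl⟩
      obtain ⟨hlt, hval, hfirst⟩ := PySem.List.getElem_of_index?_eq_some hidx
      have hltw : idx < weight.length := hlen ▸ hlt
      have hgw : PySem.List.pyGet? weight (idx : Int) = some weight[idx] :=
        (PySem.List.pyGet?_natCast weight idx).trans (List.getElem?_eq_getElem hltw)
      have hgv : PySem.List.pyGet? value (idx : Int) = some value[idx] :=
        (PySem.List.pyGet?_natCast value idx).trans (List.getElem?_eq_getElem hlt)
      -- decompose the zipped list around index idx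
      set l : List (Int × Int) := value.zip weight with hl
      have hllen : l.length = value.length := by simp [hl, hlen]
      have hlidx : idx < l.length := by omega
      have hdecomp : l = l.take idx ++ l[idx] :: l.drop (idx + 1) := by
        conv_lhs => rw [← List.take_append_drop idx l, List.drop_eq_getElem_cons hlidx]
      have hlp : l[idx] = (value[idx], weight[idx]) := List.getElem_zip (h := hlidx)
      have herase : l.eraseIdx idx = l.take idx ++ l.drop (idx + 1) :=
        List.eraseIdx_eq_take_drop_succ l idx
      -- left of idx: strictly smaller values (idx is the FIRST maximum)
      have hleft : ∀ x ∈ l.take idx, -(l[idx]).1 < -x.1 := by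
        intro x hx
        obtain ⟨j, hj, hxe⟩ := List.mem_iff_getElem.mp hx
        have hjlt : j < idx := by have h2 := List.length_take_le idx l; omega
        have hjl : j < l.length := by omega
        have hg : (l.take idx)[j] = l[j] := List.getElem_take
        rw [hg] at hxe
        have hjv : j < value.length := by omega
        have hx1 : x.1 = value[j] := by rw [← hxe, List.getElem_zip (h := hjl)]
        have hne : value[j] ≠ m := hfirst j hjlt
        have hle : value[j] ≤ m := hmax _ (List.getElem_mem hjv)
        rw [hlp]; simp only [hx1]
        have : value[j] < m := lt_of_le_of_ne hle hne
        simp only [hval]; omega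
      -- right of idx: values at most the maximum
      have hright : ∀ x ∈ l.drop (idx + 1), -(l[idx]).1 ≤ -x.1 := by
        rintro ⟨a, b⟩ hx
        have hxl : (a, b) ∈ l := List.mem_of_mem_drop hx
        have ha : a ∈ value := (List.of_mem_zip hxl).1
        have := hmax _ ha
        rw [hlp]; simp only [hval]; simp; omega
      have hsorted : PySem.List.sorted l (fun p => -p.1) false
          = l[idx] :: PySem.List.sorted (l.eraseIdx idx) (fun p => -p.1) false := by
        rw [herase]
        conv_lhs => rw [hdecomp]
        exact sorted_select (fun p : Int × Int => -p.1) _ _ _ hleft hright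
      -- unfold one iteration of A
      rw [solveLoopA]
      simp only [if_pos hrun, hm, hidx, hgw, hgv]
      -- unfold one iteration of B
      rw [hsorted, hlp]
      simp only [solveLoopB]
      have hr0 : ¬ total - sums ≤ 0 := by omega
      rw [if_neg hr0]
      by_cases htake : weight[idx] ≤ total - sums
      · rw [if_pos htake, if_pos htake]
        have hcap' : total - (sums + weight[idx]) ≤ (weight.eraseIdx idx).sum := by
          rw [sum_eraseIdx weight idx hltw]; omega
        have hstep := ih (value.eraseIdx idx) (weight.eraseIdx idx) total
          (sums + weight[idx]) (values + weight[idx] * value[idx])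
          (by rw [List.length_eraseIdx_of_lt hlt, List.length_eraseIdx_of_lt hltw, hlen])
          (by rw [List.length_eraseIdx_of_lt hlt]; omega) hcap'
        rw [hstep, zip_eraseIdx value weight idx, ← hl]
        have harith : total - (sums + weight[idx]) = total - sums - weight[idx] := by ring
        rw [harith]
      · rw [if_neg htake, if_neg htake]
    · rw [solveLoopA, if_neg hrun, solveLoopB_nonpos _ _ _ (by omega)]

-- ===== VERDICT (by name: the statement is the Claim_ definition above) =====
theorem solve_spec : Claim_equal_solve := by
  intro value weight total _ hpre
  unfold Spec_solve solve solve_alt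
  rcases hpre with htot | ⟨hlen, hcap⟩
  · rw [solveLoopA]
    rw [if_neg (by omega), solveLoopB_nonpos _ _ _ (by omega)]
  · have := loopA_eq_loopB (value.length + 1) value weight total 0 0 hlen (by omega)
      (by omega)
    simpa using this
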